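-- pv_equiv track=rewrite | github.com/khuushichand/aiml-project | tldw_Server_API/app/core/MCP_unified/command_runtime/adapters.py | _split_json_path
-- ===== SOURCE A (Python) =====
-- def _split_json_path(path: str) -> list[str]:
--     normalized = path.strip().lstrip(".")
--     if not normalized:
--         return []
--
--     parts: list[str] = []
--     current: list[str] = []
--     escaped = False
--     for char in normalized:
--         if escaped:
--             current.append(char)
--             escaped = False
--             continue
--         if char == "\\":
--             escaped = True
--             continue
--         if char == ".":
--             if current:
--                 parts.append("".join(current))
--                 current = []
--             continue
--         current.append(char)
--     if escaped:
--         current.append("\\")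
--     if current:
--         parts.append("".join(current))
--     return parts
-- ===== SOURCE B (Python) =====
-- def _unescape(t: str) -> str:
--     out = []
--     j = 0
--     while j < len(t):
--         if t[j] == "\\" and j + 1 < len(t):
--             out.append(t[j + 1])
--             j += 2
--         else:
--             out.append(t[j])
--             j += 1
--     return "".join(out)
--
--
-- def _split_json_path(path: str) -> list[str]:
--     s = path.strip().lstrip(".")
--     # phase 1: cut into raw tokens at unescaped dots (escape sequences kept intact)
--     raw = []
--     tok = []
--     i = 0
--     while i < len(s):
--         c = s[i]
--         if c == "\\" and i + 1 < len(s):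
--             tok.append(c)
--             tok.append(s[i + 1])
--             i += 2
--         elif c == ".":
--             raw.append("".join(tok))
--             tok = []
--             i += 1
--         else:
--             tok.append(c)
--             i += 1
--     raw.append("".join(tok))
--     # phase 2: drop empty tokens, unescape the rest
--     return [_unescape(t) for t in raw if t]
-- ===== Notes on version B (the rewrite author's own statement) =====
-- stated objective: alternative
-- what changed: A's single pass with an escaped-flag accumulator that splits and unescapes simultaneously is replaced by a two-phase decomposition: first tokenize into raw segments at unescaped dots (escape sequences kept intact, consumed two chars at a time), then drop empty tokens and unescape each one in a separate pass.
import Mathlib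
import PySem

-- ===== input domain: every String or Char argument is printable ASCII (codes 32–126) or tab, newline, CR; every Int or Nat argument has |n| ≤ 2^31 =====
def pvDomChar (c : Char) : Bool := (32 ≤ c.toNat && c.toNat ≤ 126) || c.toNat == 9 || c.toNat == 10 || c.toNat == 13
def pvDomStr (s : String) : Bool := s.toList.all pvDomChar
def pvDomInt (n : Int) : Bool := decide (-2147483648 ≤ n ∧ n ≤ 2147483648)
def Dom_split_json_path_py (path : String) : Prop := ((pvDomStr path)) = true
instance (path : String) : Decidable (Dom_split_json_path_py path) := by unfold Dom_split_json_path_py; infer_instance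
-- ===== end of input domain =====

-- B replaces A's single-pass escaped-flag accumulator by a two-phase 'tokenize at unescaped
-- dots (escapes kept), then unescape each token' decomposition (objective: alternative, same cost).

-- ===== PORT A =====
-- one loop iteration of A: state (parts, current, escaped)
def aStep (st : List String × List Char × Bool) (c : Char) :
    List String × List Char × Bool :=
  match st with
  | (parts, current, escaped) =>
    if escaped then (parts, current ++ [c], false)
    else if c = '\\' then (parts, current, true)
    else if c = '.' then
      (if current ≠ [] then (parts ++ [String.ofList current], [], false)
       else (parts, current, false))
    else (parts, current ++ [c], false)

-- A's code after the loop: trailing escape keeps a literal backslash, flush current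
def aFinish (st : List String × List Char × Bool) : List String :=
  match st with
  | (parts, current, escaped) =>
    let current := if escaped then current ++ ['\\'] else current
    if current ≠ [] then parts ++ [String.ofList current] else parts

def split_json_path_py (path : String) : List String :=
  -- path.strip().lstrip("."): strip via PySem; lstrip(".") ported by hand as dropWhile,
  -- exact: str.lstrip(chars) removes exactly the leading characters from the set
  let normalized := (PySem.Chars.strip path.toList).dropWhile (fun c => c = '.')
  if normalized = [] then []
  else aFinish (normalized.foldl aStep ([], [], false))

-- ===== PORT B =====
-- phase 2 helper: _unescape's while loop (consumes '\' + next char as a pair)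
def bUnesc : List Char → List Char
  | [] => []
  | [c] => [c]
  | c :: d :: rest => if c = '\\' then d :: bUnesc rest else c :: bUnesc (d :: rest)

-- phase 1: B's while loop cutting into raw tokens at unescaped dots, escapes kept intact
def bTok : List Char → List Char → List (List Char)
  | [], tok => [tok]
  | [c], tok => if c = '.' then tok :: [[]] else [tok ++ [c]]
  | c :: d :: rest, tok =>
    if c = '\\' then bTok rest (tok ++ [c, d])
    else if c = '.' then tok :: bTok (d :: rest) []
    else bTok (d :: rest) (tok ++ [c])

def split_json_path_py_alt (path : String) : List String :=
  let s := (PySem.Chars.strip path.toList).dropWhile (fun c => c = '.')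
  let raw := bTok s []
  (raw.filter (fun t => t ≠ [])).map (fun t => String.ofList (bUnesc t))

-- ===== PRECONDITION & SPEC =====
def Spec_split_json_path_py (path : String) (out : List String) : Prop := out = split_json_path_py_alt path
instance (path : String) (out : List String) : Decidable (Spec_split_json_path_py path out) := by unfold Spec_split_json_path_py; infer_instance

-- ===== CLAIM (what is proved, stated in full; the proofs are below) =====
def Claim_equal_split_json_path_py : Prop := ∀ (path : String), Dom_split_json_path_py path → Spec_split_json_path_py path (split_json_path_py path)

-- ===== LEMMAS AND PROOFS =====

-- raw tokens are well-formed: every backslash inside starts a two-char escape pair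
def wfTok : List Char → Bool
  | [] => true
  | [c] => decide (c ≠ '\\')
  | c :: d :: rest => if c = '\\' then wfTok rest else wfTok (d :: rest)

theorem wfTok_snoc (tok : List Char) (c : Char) (h : wfTok tok = true) (hc : c ≠ '\\') :
    wfTok (tok ++ [c]) = true := by
  induction tok using wfTok.induct <;> simp_all [wfTok]

theorem wfTok_snoc_pair (tok : List Char) (d : Char) (h : wfTok tok = true) :
    wfTok (tok ++ ['\\', d]) = true := by
  induction tok using wfTok.induct <;> simp_all [wfTok]

theorem bUnesc_snoc (tok : List Char) (c : Char) (h : wfTok tok = true) :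
    bUnesc (tok ++ [c]) = bUnesc tok ++ [c] := by
  induction tok using wfTok.induct <;> simp_all [wfTok, bUnesc]

theorem bUnesc_snoc_pair (tok : List Char) (d : Char) (h : wfTok tok = true) :
    bUnesc (tok ++ ['\\', d]) = bUnesc tok ++ [d] := by
  induction tok using wfTok.induct <;> simp_all [wfTok, bUnesc]

theorem bUnesc_eq_nil_iff (tok : List Char) : bUnesc tok = [] ↔ tok = [] := by
  match tok with
  | [] => simp [bUnesc]
  | [c] => simp [bUnesc]
  | c :: d :: rest => simp only [bUnesc]; split_ifs <;> simp

-- the loop invariant: A's state carries the UNESCAPED current token while B's raw token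
-- still carries its escapes; the two finishes agree
theorem main_inv (l tok : List Char) : ∀ (parts : List String), wfTok tok = true →
    aFinish (l.foldl aStep (parts, bUnesc tok, false)) =
      parts ++ ((bTok l tok).filter (fun t => t ≠ [])).map (fun t => String.ofList (bUnesc t)) := by
  induction l, tok using bTok.induct with
  | case1 tok =>
      intro parts h
      by_cases htok : tok = []
      · simp [htok, bUnesc, aFinish, bTok]
      · have hne : bUnesc tok ≠ [] := by simpa [bUnesc_eq_nil_iff] using htok
        simp [aFinish, bTok, htok, hne]
  | case2 tok =>
      intro parts h
      by_cases htok : tok = []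
      · simp [htok, bUnesc, aStep, aFinish, bTok]
      · have hne : bUnesc tok ≠ [] := by simpa [bUnesc_eq_nil_iff] using htok
        simp [aStep, aFinish, bTok, htok, hne]
  | case3 c tok hc =>
      intro parts h
      by_cases hb : c = '\\'
      · subst hb
        have h1 := bUnesc_snoc tok '\\' h
        simp [aStep, aFinish, bTok, hc, h1]
      · have h1 := bUnesc_snoc tok c h
        simp [aStep, aFinish, bTok, hb, hc, h1]
  | case4 d rest tok ih =>
      intro parts h
      have h1 := bUnesc_snoc_pair tok d h
      have e1 : aStep (parts, bUnesc tok, false) '\\' = (parts, bUnesc tok, true) := by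
        simp [aStep]
      have e2 : aStep (parts, bUnesc tok, true) d = (parts, bUnesc (tok ++ ['\\', d]), false) := by
        simp [aStep, h1]
      rw [List.foldl_cons, e1, List.foldl_cons, e2]
      simp only [bTok]
      exact ih parts (wfTok_snoc_pair tok d h)
  | case5 d rest tok hnb ih =>
      intro parts h
      by_cases htok : tok = []
      · have e1 : aStep (parts, bUnesc tok, false) '.' = (parts, bUnesc [], false) := by
          simp [aStep, htok, bUnesc]
        rw [List.foldl_cons, e1, ih parts (by simp [wfTok])]
        simp [bTok, htok]
      · have hne : bUnesc tok ≠ [] := by simpa [bUnesc_eq_nil_iff] using htok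
        have e1 : aStep (parts, bUnesc tok, false) '.'
            = (parts ++ [String.ofList (bUnesc tok)], bUnesc [], false) := by
          simp [aStep, hne, bUnesc]
        rw [List.foldl_cons, e1, ih (parts ++ [String.ofList (bUnesc tok)]) (by simp [wfTok])]
        simp [bTok, htok, List.append_assoc]
  | case6 c d rest tok hb hc ih =>
      intro parts h
      have h1 := bUnesc_snoc tok c h
      have e1 : aStep (parts, bUnesc tok, false) c = (parts, bUnesc (tok ++ [c]), false) := by
        simp [aStep, hb, hc, h1]
      simp only [List.foldl_cons, e1, bTok, if_neg hb, if_neg hc]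
      exact ih parts (wfTok_snoc tok c h hb)

-- ===== VERDICT (by name: the statement is the Claim_ definition above) =====
theorem split_json_path_py_spec : Claim_equal_split_json_path_py := by
  intro path _
  unfold Spec_split_json_path_py split_json_path_py split_json_path_py_alt
  set s := (PySem.Chars.strip path.toList).dropWhile (fun c => c = '.') with hs
  by_cases hnil : s = []
  · simp [hnil, bTok]
  · rw [if_neg hnil]
    have := main_inv s [] [] (by simp [wfTok])
    simpa [bUnesc] using this
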